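-- pv_equiv track=rewrite | github.com/Fondamenti18/fondamenti-di-programmazione | students/1814576/homework01/program02.py | trasfnumero
-- ===== SOURCE A (Python) =====
-- def trasfnumero(n):
-- 	#questa funzione permette di trasformare un numero in una lista con cui poterci lavorare
-- 	#essa dividera il numero in gruppi da tre e aggiunge 0 alle posizioni vuote
-- 	n=[int(i) for i in str(n)]
-- 	n.reverse()
-- 	a=len(n)
-- 	controllo=False
-- 	while controllo!=True:
-- 		a=len(n)
-- 		if a%3!=0:
-- 			n+=[0]
-- 		else:
-- 			controllo=True
-- 	return n
-- ===== SOURCE B (Python) =====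
-- def trasfnumero(n):
--     # same digit extraction as A (raises identically on negatives);
--     # padding computed in closed form instead of a one-zero-at-a-time loop
--     n = [int(i) for i in str(n)]
--     n.reverse()
--     return n + [0] * (-len(n) % 3)
-- ===== Notes on version B (the rewrite author's own statement) =====
-- stated objective: simpler
-- what changed: replaces the sentinel-controlled while loop that appends one zero per iteration with a closed-form padding count (-len(n) % 3) and a single list extension
import Mathlib
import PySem

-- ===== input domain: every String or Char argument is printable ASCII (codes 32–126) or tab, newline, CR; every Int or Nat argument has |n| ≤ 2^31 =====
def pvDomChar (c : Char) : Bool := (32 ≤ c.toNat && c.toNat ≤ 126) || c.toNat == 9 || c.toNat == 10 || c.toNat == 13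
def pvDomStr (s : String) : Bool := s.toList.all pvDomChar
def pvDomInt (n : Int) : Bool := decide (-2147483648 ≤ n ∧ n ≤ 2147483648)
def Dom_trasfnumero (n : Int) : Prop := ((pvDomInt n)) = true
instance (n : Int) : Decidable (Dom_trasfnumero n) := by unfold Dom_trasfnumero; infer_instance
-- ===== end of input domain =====

-- B replaces A's while loop (append one zero per iteration) with a closed-form padding count.

-- ===== PORT A =====
-- digit extraction: [int(i) for i in str(n)]; on Pre_ (0 ≤ n) every char of str(n)
-- is a digit, so ofChars? is always some; the .getD 0 default is never reached there.
def pvDigits (n : Int) : List Int :=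
  (PySem.Int.toChars n).map (fun c => (PySem.Int.ofChars? [c]).getD 0)

-- the while loop: while len(n) % 3 != 0: n += [0]
def pvPadA (l : List Int) : List Int :=
  if l.length % 3 ≠ 0 then pvPadA (l ++ [0]) else l
termination_by (3 - l.length % 3) % 3
decreasing_by simp; omega

def trasfnumero (n : Int) : List Int :=
  pvPadA (pvDigits n).reverse

-- ===== PORT B =====
def trasfnumero_alt (n : Int) : List Int :=
  let ds := (pvDigits n).reverse
  ds ++ List.replicate (PySem.Int.mod (-(ds.length : Int)) 3).toNat 0

-- ===== PRECONDITION & SPEC =====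
-- Pre_ excludes negative n, on which both Pythons raise ValueError (int('-')).
def Pre_trasfnumero (n : Int) : Prop := 0 ≤ n
instance (n : Int) : Decidable (Pre_trasfnumero n) := by unfold Pre_trasfnumero; infer_instance
def pvWitness_trasfnumero : Int := (123)
def Spec_trasfnumero (n : Int) (out : List Int) : Prop := out = trasfnumero_alt n
instance (n : Int) (out : List Int) : Decidable (Spec_trasfnumero n out) := by unfold Spec_trasfnumero; infer_instance

-- ===== CLAIM (what is proved, stated in full; the proofs are below) =====
def Claim_equal_trasfnumero : Prop := ∀ (n : Int), Dom_trasfnumero n → Pre_trasfnumero n → Spec_trasfnumero n (trasfnumero n)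

-- ===== LEMMAS AND PROOFS =====
lemma pvPadA_eq (l : List Int) :
    pvPadA l = l ++ List.replicate ((3 - l.length % 3) % 3) 0 := by
  have h : l.length % 3 = 0 ∨ l.length % 3 = 1 ∨ l.length % 3 = 2 := by omega
  rcases h with h | h | h
  · rw [pvPadA]; simp [h]
  · rw [pvPadA, if_pos (by omega)]
    rw [pvPadA, if_pos (by simp; omega)]
    rw [pvPadA, if_neg (by simp; omega)]
    simp [h]
  · rw [pvPadA, if_pos (by omega)]
    rw [pvPadA, if_neg (by simp; omega)]
    simp [h]

-- ===== VERDICT (by name: the statement is the Claim_ definition above) =====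
theorem trasfnumero_spec : Claim_equal_trasfnumero := by
  intro n _ _
  show trasfnumero n = trasfnumero_alt n
  unfold trasfnumero trasfnumero_alt
  rw [pvPadA_eq]
  simp only []
  rw [PySem.Int.mod_eq_emod_of_pos (by norm_num : (0:Int) < 3)]
  congr 1
  congr 1
  omega
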